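-- pv_equiv track=rewrite | github.com/CocoMarck/freestyle-trainer | utils/text_util/text_filter.py | only_the_comment
-- ===== SOURCE A (Python) =====
-- def only_the_comment( text=None, comment='#' ):
--     '''Obtener solo los comentarios de un texto'''
--     if (
--         '\n' in text and
--         comment in text
--     ):
--         # Cuando hay saltos de linea y comentarios
--
--         text_ready = ''
--         for line in text.split('\n'):
--             line = only_the_comment(text=line, comment=comment)
--             if not line == None:
--                 text_ready += f'{line}\n'
--
--         return text_ready[:-1]
--
--     elif comment in text:
--         # Cuando hay comentarios pero no saltos de linea
--         text = text.split(comment)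
--         return text[1]
--
--     else:
--         # No hay nada de comenarios
--         return None
-- ===== SOURCE B (Python) =====
-- def only_the_comment(text=None, comment='#'):
--     # Same result as A, but the per-line self-recursion is flattened into one
--     # direct pass: filter the lines that contain the comment marker, map each to
--     # the segment after its first marker, and join with newlines.
--     if comment not in text:
--         return None
--     if '\n' not in text:
--         return text.split(comment)[1]
--     return '\n'.join(line.split(comment)[1]
--                      for line in text.split('\n') if comment in line)
-- ===== Notes on version B (the rewrite author's own statement) =====
-- stated objective: simpler
-- what changed: Replaces A's per-line self-recursion plus accumulate-then-strip-trailing-newline with guard clauses and a single filter/map/join pass over the lines.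
import Mathlib
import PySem

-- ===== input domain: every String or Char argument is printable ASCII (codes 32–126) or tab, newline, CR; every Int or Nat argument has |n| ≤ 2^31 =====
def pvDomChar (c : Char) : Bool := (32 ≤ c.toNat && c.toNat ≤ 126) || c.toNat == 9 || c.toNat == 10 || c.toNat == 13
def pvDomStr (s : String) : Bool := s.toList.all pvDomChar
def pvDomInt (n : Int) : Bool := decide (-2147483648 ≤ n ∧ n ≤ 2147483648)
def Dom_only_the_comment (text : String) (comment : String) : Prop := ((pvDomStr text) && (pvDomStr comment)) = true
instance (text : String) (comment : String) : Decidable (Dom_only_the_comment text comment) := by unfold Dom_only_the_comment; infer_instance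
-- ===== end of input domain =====

-- B replaces A's per-line self-recursion (accumulate + strip trailing newline) by guard
-- clauses and one filter/map/join pass over the lines; same return value, objective: simpler.

-- ===== PORT A =====
-- A recurses on each element of text.split('\n'); Lean needs the fact that each such line
-- is strictly shorter than text for termination (pvSplitOn_nl_lt below, cited in
-- decreasing_by).  pvSplitAux is a structural model of PySem.Chars.splitOn used only to
-- prove facts about it; the ports themselves call PySem.Chars.splitOn.
def pvSplitAux (s0 : Char) (st : List Char) : List Char → List Char → List (List Char)
  | cur, [] => [cur.reverse]
  | cur, c :: rest =>
    if (s0 :: st).isPrefixOf (c :: rest) = true then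
      cur.reverse :: pvSplitAux s0 st [] (rest.drop st.length)
    else
      pvSplitAux s0 st (c :: cur) rest
termination_by _ l => l.length
decreasing_by
  all_goals (simp; try omega)

theorem pv_go_eq (s0 : Char) (st : List Char) (fuel : Nat) :
    ∀ (l cur : List Char) (acc : List (List Char)), l.length ≤ fuel →
      PySem.Chars.splitOn.go (s0 :: st) fuel l cur acc = acc.reverse ++ pvSplitAux s0 st cur l := by
  induction fuel with
  | zero =>
    intro l cur acc h
    have : l = [] := List.eq_nil_of_length_eq_zero (by omega)
    subst this
    rw [PySem.Chars.splitOn.go, pvSplitAux]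
    all_goals try omega
    simp
  | succ f ih =>
    intro l cur acc h
    cases l with
    | nil =>
      rw [PySem.Chars.splitOn.go, pvSplitAux]
      all_goals try omega
      simp
    | cons c rest =>
      rw [PySem.Chars.splitOn.go, pvSplitAux]
      all_goals try omega
      by_cases hp : (s0 :: st).isPrefixOf (c :: rest) = true
      · rw [if_pos hp, if_pos hp]
        rw [show List.drop (s0 :: st).length (c :: rest) = rest.drop st.length from by simp]
        rw [ih (rest.drop st.length) [] (cur.reverse :: acc) (by simp at h ⊢; omega)]
        simp
      · rw [if_neg hp, if_neg hp]
        exact ih rest (c :: cur) acc (by simp at h ⊢; omega)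

theorem pvSplitOn_eq (s0 : Char) (st : List Char) (l : List Char) :
    PySem.Chars.splitOn l (s0 :: st) = pvSplitAux s0 st [] l := by
  unfold PySem.Chars.splitOn
  simpa using pv_go_eq s0 st (l.length + 1) l [] [] (by omega)

theorem pvSplitAux_single_le (c : Char) :
    ∀ (l cur : List Char), ∀ p ∈ pvSplitAux c [] cur l, p.length ≤ cur.length + l.length := by
  intro l
  induction l with
  | nil =>
    intro cur p hp
    rw [pvSplitAux] at hp
    simp at hp
    subst hp; simp
  | cons c' rest ih =>
    intro cur p hp
    rw [pvSplitAux] at hp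
    by_cases hc : c = c'
    · subst hc
      simp [List.isPrefixOf] at hp
      rcases hp with hp | hp
      · subst hp; simp; try omega
      · have := ih [] p hp
        simp at this; simp; omega
    · simp [List.isPrefixOf, hc] at hp
      have := ih (c' :: cur) p hp
      simp at this; simp; omega

theorem pvSplitAux_single_lt (c : Char) :
    ∀ (l cur : List Char), c ∈ l → ∀ p ∈ pvSplitAux c [] cur l, p.length < cur.length + l.length := by
  intro l
  induction l with
  | nil => intro cur hmem; simp at hmem
  | cons c' rest ih =>
    intro cur hmem p hp
    rw [pvSplitAux] at hp
    by_cases hc : c = c'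
    · subst hc
      simp [List.isPrefixOf] at hp
      rcases hp with hp | hp
      · subst hp; simp; try omega
      · have := pvSplitAux_single_le c rest [] p hp
        simp at this; simp; omega
    · simp [List.isPrefixOf, hc] at hp
      have hmem' : c ∈ rest := by
        rcases List.mem_cons.mp hmem with h | h
        · exact absurd h hc
        · exact h
      have := ih (c' :: cur) hmem' p hp
      simp at this; simp; omega

theorem pvSplitOn_nl_lt (text : List Char) (h : PySem.Chars.isIn ['\n'] text = true) :
    ∀ p ∈ PySem.Chars.splitOn text ['\n'], p.length < text.length := by
  intro p hp
  rw [pvSplitOn_eq] at hp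
  have hmem : '\n' ∈ text := (List.singleton_infix_iff _ _).mp ((PySem.Chars.isIn_iff_infix _ _).mp h)
  have := pvSplitAux_single_lt '\n' text [] hmem p hp
  simpa using this

-- The port of A: literal recursion structure of the Python (multi-line branch folds the
-- recursive per-line results into text_ready and strips the trailing newline with [:-1]).
-- In the single-line comment branch Python's text.split(comment)[1] is pyGet? …, whose
-- none case (IndexError) is unreachable there since comment occurs in text.
def pvOtcA (text : List Char) (comment : List Char) : Option (List Char) :=
  if h : PySem.Chars.isIn ['\n'] text = true ∧ PySem.Chars.isIn comment text = true then
    some (PySem.Chars.slice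
      ((PySem.Chars.splitOn text ['\n']).attach.foldl
        (fun acc line =>
          match pvOtcA line.1 comment with
          | some l => acc ++ l ++ ['\n']
          | none => acc) [])
      none (some (-1)))
  else if PySem.Chars.isIn comment text = true then
    PySem.List.pyGet? (PySem.Chars.splitOn text comment) 1
  else
    none
termination_by text.length
decreasing_by
  exact pvSplitOn_nl_lt text h.1 line.1 line.2

def only_the_comment (text : String) (comment : String) : Option String :=
  (pvOtcA text.toList comment.toList).map String.ofList

-- ===== PORT B =====
def pvOtcB (text : List Char) (comment : List Char) : Option (List Char) :=
  if PySem.Chars.isIn comment text = false then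
    none
  else if PySem.Chars.isIn ['\n'] text = false then
    PySem.List.pyGet? (PySem.Chars.splitOn text comment) 1
  else
    some (PySem.Chars.join ['\n']
      (((PySem.Chars.splitOn text ['\n']).filter
          (fun line => PySem.Chars.isIn comment line)).map
        (fun line => (PySem.List.pyGet? (PySem.Chars.splitOn line comment) 1).getD [])))

def only_the_comment_alt (text : String) (comment : String) : Option String :=
  (pvOtcB text.toList comment.toList).map String.ofList

-- ===== PRECONDITION & SPEC =====
-- Pre_ excludes only comment = "": there Python's split('') raises ValueError (A returns nothing).
def Pre_only_the_comment (text : String) (comment : String) : Prop := comment ≠ ""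
instance (text : String) (comment : String) : Decidable (Pre_only_the_comment text comment) := by unfold Pre_only_the_comment; infer_instance
def pvWitness_only_the_comment : String × String := ("a#b\nc", "#")

def Spec_only_the_comment (text : String) (comment : String) (out : Option String) : Prop := out = only_the_comment_alt text comment
instance (text : String) (comment : String) (out : Option String) : Decidable (Spec_only_the_comment text comment out) := by unfold Spec_only_the_comment; infer_instance

-- ===== CLAIM (what is proved, stated in full; the proofs are below) =====
def Claim_equal_only_the_comment : Prop := ∀ (text : String) (comment : String), Dom_only_the_comment text comment → Pre_only_the_comment text comment → Spec_only_the_comment text comment (only_the_comment text comment)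

-- ===== LEMMAS AND PROOFS =====
theorem pvSplitAux_single_not_mem (c : Char) :
    ∀ (l cur : List Char), c ∉ cur → ∀ p ∈ pvSplitAux c [] cur l, c ∉ p := by
  intro l
  induction l with
  | nil =>
    intro cur hcur p hp
    rw [pvSplitAux] at hp
    simp at hp
    subst hp; simpa using hcur
  | cons c' rest ih =>
    intro cur hcur p hp
    rw [pvSplitAux] at hp
    by_cases hc : c = c'
    · subst hc
      simp [List.isPrefixOf] at hp
      rcases hp with hp | hp
      · subst hp; simpa using hcur
      · exact ih [] (by simp) p hp
    · simp [List.isPrefixOf, hc] at hp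
      have hnotin : c ∉ c' :: cur := by
        intro hmem
        rcases List.mem_cons.mp hmem with h | h
        · exact hc h
        · exact hcur h
      exact ih (c' :: cur) hnotin p hp

theorem pvSplitAux_length_pos (s0 : Char) (st : List Char) :
    ∀ (cur l : List Char), 1 ≤ (pvSplitAux s0 st cur l).length := by
  intro cur l
  induction cur, l using pvSplitAux.induct s0 st with
  | case1 cur => rw [pvSplitAux]; simp
  | case2 cur c rest hp ih => rw [pvSplitAux]; simp [hp]
  | case3 cur c rest hp ih => rw [pvSplitAux]; simp [hp]; exact ih

theorem pvSplitAux_two_le (s0 : Char) (st : List Char) :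
    ∀ (cur l : List Char), (s0 :: st) <:+: l → 2 ≤ (pvSplitAux s0 st cur l).length := by
  intro cur l
  induction cur, l using pvSplitAux.induct s0 st with
  | case1 cur =>
    intro h
    have := h.length_le
    simp at this
  | case2 cur c rest hp ih =>
    intro _
    rw [pvSplitAux]
    simp [hp]
    exact pvSplitAux_length_pos s0 st [] (rest.drop st.length)
  | case3 cur c rest hp ih =>
    intro h
    rw [pvSplitAux]
    simp [hp]
    refine ih ?_
    obtain ⟨pre, suf, heq⟩ := h
    cases pre with
    | nil =>
      exfalso
      apply hp
      have : (s0 :: st) <+: c :: rest := ⟨suf, by simpa using heq⟩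
      exact List.isPrefixOf_iff_prefix.mpr this
    | cons p ps =>
      refine ⟨ps, suf, ?_⟩
      simpa using congrArg List.tail heq

theorem pvSplitOn_nl_not_mem (text : List Char) :
    ∀ p ∈ PySem.Chars.splitOn text ['\n'], '\n' ∉ p := by
  intro p hp
  rw [pvSplitOn_eq] at hp
  exact pvSplitAux_single_not_mem '\n' text [] (by simp) p hp

theorem pvSplitOn_two_le (text sep : List Char) (hs : sep ≠ [])
    (h : PySem.Chars.isIn sep text = true) : 2 ≤ (PySem.Chars.splitOn text sep).length := by
  cases sep with
  | nil => exact absurd rfl hs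
  | cons s0 st =>
    rw [pvSplitOn_eq]
    exact pvSplitAux_two_le s0 st [] text ((PySem.Chars.isIn_iff_infix _ _).mp h)

theorem pvGet1_eq_some (xs : List (List Char)) (h : 2 ≤ xs.length) :
    PySem.List.pyGet? xs 1 = some ((PySem.List.pyGet? xs 1).getD []) := by
  have h1 : (1 : Nat) < xs.length := by omega
  have : PySem.List.pyGet? xs ((1 : Nat) : Int) = xs[1]? := PySem.List.pyGet?_natCast xs 1
  rw [show ((1 : Nat) : Int) = (1 : Int) by norm_cast] at this
  rw [this, List.getElem?_eq_getElem h1]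
  rfl

theorem pvFoldl_attachGen {α β : Type} (L : List α) (F : β → α → β) (a : β) :
    L.attach.foldl (fun acc t => F acc t.1) a = L.foldl F a := List.foldl_attach

theorem pvFoldl_attach (comment : List Char) (L : List (List Char)) (a : List Char) :
    L.attach.foldl (fun acc line => match pvOtcA line.1 comment with | some l => acc ++ l ++ ['\n'] | none => acc) a
      = L.foldl (fun acc line => match pvOtcA line comment with | some l => acc ++ l ++ ['\n'] | none => acc) a :=
  pvFoldl_attachGen L (fun acc line => match pvOtcA line comment with | some l => acc ++ l ++ ['\n'] | none => acc) a

theorem pvFoldl_eq (comment : List Char) (L : List (List Char)) (a : List Char) :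
    L.foldl (fun acc line => match pvOtcA line comment with | some l => acc ++ l ++ ['\n'] | none => acc) a
      = a ++ ((L.filterMap (fun line => pvOtcA line comment)).map (fun l => l ++ ['\n'])).flatten := by
  induction L generalizing a with
  | nil => simp
  | cons x L ih =>
    simp only [List.foldl_cons, List.filterMap_cons]
    cases hfx : pvOtcA x comment with
    | none => exact ih a
    | some l =>
      rw [ih]
      simp

theorem pvFlatten_dropLast (ys : List (List Char)) :
    ((ys.map (fun l => l ++ ['\n'])).flatten).dropLast = PySem.Chars.join ['\n'] ys := by
  induction ys with
  | nil => simp [PySem.Chars.join_nil]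
  | cons y ys ih =>
    cases ys with
    | nil => simp [PySem.Chars.join_singleton]
    | cons z zs =>
      have hne : ((List.map (fun l => l ++ ['\n']) (z :: zs)).flatten) ≠ [] := by simp
      rw [List.map_cons, List.flatten_cons, List.dropLast_append_of_ne_nil hne, ih,
        PySem.Chars.join_cons_cons, List.append_assoc]

theorem pvFilterMap_eq (f : List Char → Option (List Char)) (p : List Char → Bool)
    (g : List Char → List Char) (L : List (List Char))
    (h : ∀ x ∈ L, f x = if p x then some (g x) else none) :
    L.filterMap f = (L.filter p).map g := by
  induction L with
  | nil => simp
  | cons x L ih =>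
    have hx := h x (by simp)
    by_cases hpx : p x = true
    · simp [List.filter_cons, hx, hpx,
        ih (fun y hy => h y (by simp [hy]))]
    · simp at hpx
      simp [List.filter_cons, hx, hpx,
        ih (fun y hy => h y (by simp [hy]))]

theorem pvOtc_eq (text comment : List Char) (hc : comment ≠ []) :
    pvOtcA text comment = pvOtcB text comment := by
  by_cases h1 : PySem.Chars.isIn ['\n'] text = true <;>
    by_cases h2 : PySem.Chars.isIn comment text = true
  · -- multi-line with comments
    rw [pvOtcA]
    rw [dif_pos ⟨h1, h2⟩]
    unfold pvOtcB
    rw [if_neg (by simp [h2]), if_neg (by simp [h1])]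
    rw [pvFoldl_attach comment, pvFoldl_eq comment]
    have hcong : ∀ line ∈ PySem.Chars.splitOn text ['\n'],
        pvOtcA line comment
          = if PySem.Chars.isIn comment line then
              some ((PySem.List.pyGet? (PySem.Chars.splitOn line comment) 1).getD [])
            else none := by
      intro line hline
      have hnl : PySem.Chars.isIn ['\n'] line = false := by
        rw [PySem.Chars.isIn_eq_false_iff]
        rw [List.singleton_infix_iff]
        exact pvSplitOn_nl_not_mem text line hline
      rw [pvOtcA]
      rw [dif_neg (by simp [hnl])]
      by_cases hcl : PySem.Chars.isIn comment line = true
      · rw [if_pos hcl, if_pos hcl]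
        exact pvGet1_eq_some _ (pvSplitOn_two_le line comment hc hcl)
      · simp at hcl
        rw [if_neg (by simp [hcl]), hcl]
        simp
    rw [pvFilterMap_eq _ (fun line => PySem.Chars.isIn comment line)
        (fun line => (PySem.List.pyGet? (PySem.Chars.splitOn line comment) 1).getD []) _ hcong]
    rw [PySem.Chars.slice_eq_listSlice, PySem.List.slice_to_neg_one]
    simp only [List.nil_append]
    rw [pvFlatten_dropLast]
  · -- '\n' present but no comment: both none
    rw [pvOtcA]
    rw [dif_neg (by simp [h2]), if_neg h2]
    unfold pvOtcB
    simp at h2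
    rw [if_pos h2]
  · -- comment present, single line
    rw [pvOtcA]
    rw [dif_neg (by simp [h1]), if_pos h2]
    unfold pvOtcB
    simp at h1
    rw [if_neg (by simp [h2]), if_pos h1]
  · -- neither
    rw [pvOtcA]
    rw [dif_neg (by simp [h2]), if_neg h2]
    unfold pvOtcB
    simp at h2
    rw [if_pos h2]

-- ===== VERDICT (by name: the statement is the Claim_ definition above) =====
theorem only_the_comment_spec : Claim_equal_only_the_comment := by
  intro text comment _ hpre
  unfold Spec_only_the_comment only_the_comment only_the_comment_alt
  have hc : comment.toList ≠ [] := fun h => hpre (String.toList_eq_nil_iff.mp h)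
  rw [pvOtc_eq text.toList comment.toList hc]
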